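-- pv_equiv track=rewrite | github.com/MrBrantCode/unitest_baseline | mut_generate/mist_train_taco/taco_17617/solution.py | reverse_diagonals
-- ===== SOURCE A (Python) =====
-- def reverse_diagonals(matrix):
--     # Create a copy of the matrix to avoid modifying the original matrix
--     copy = [line[:] for line in matrix]
--
--     # Get the size of the matrix (since it's a square matrix, the number of rows is equal to the number of columns)
--     n = len(matrix)
--
--     # Reverse the elements on the main diagonal (top-left to bottom-right)
--     for i in range(n):
--         copy[i][i] = matrix[n - 1 - i][n - 1 - i]
--
--     # Reverse the elements on the secondary diagonal (top-right to bottom-left)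
--     for i in range(n):
--         copy[i][n - 1 - i] = matrix[n - 1 - i][i]
--
--     return copy
-- ===== SOURCE B (Python) =====
-- def reverse_diagonals(matrix):
--     n = len(matrix)
--     # 180-degree rotation of the matrix: rot[i][j] == matrix[n-1-i][n-1-j]
--     rot = [row[::-1] for row in reversed(matrix)]
--     # a diagonal reversed in place is exactly the point-reflected matrix
--     # restricted to that diagonal, so pick rot on the diagonals, matrix elsewhere
--     return [[rot[i][j] if i == j or i + j == n - 1 else matrix[i][j]
--              for j in range(n)]
--             for i in range(n)]
-- ===== Notes on version B (the rewrite author's own statement) =====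
-- stated objective: alternative
-- what changed: Instead of copying and overwriting the two diagonals, B builds the 180-degree rotation of the matrix once and selects, cell by cell, the rotated value on the diagonals and the original value elsewhere (a reversed diagonal is exactly the point reflection restricted to that diagonal).
-- outside the precondition, e.g. on reverse_diagonals([[1, 2, 3], [4, 5, 6]]): A returns [[5, 4, 3], [2, 1, 6]], B returns [[6, 5], [3, 2]]
import Mathlib
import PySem

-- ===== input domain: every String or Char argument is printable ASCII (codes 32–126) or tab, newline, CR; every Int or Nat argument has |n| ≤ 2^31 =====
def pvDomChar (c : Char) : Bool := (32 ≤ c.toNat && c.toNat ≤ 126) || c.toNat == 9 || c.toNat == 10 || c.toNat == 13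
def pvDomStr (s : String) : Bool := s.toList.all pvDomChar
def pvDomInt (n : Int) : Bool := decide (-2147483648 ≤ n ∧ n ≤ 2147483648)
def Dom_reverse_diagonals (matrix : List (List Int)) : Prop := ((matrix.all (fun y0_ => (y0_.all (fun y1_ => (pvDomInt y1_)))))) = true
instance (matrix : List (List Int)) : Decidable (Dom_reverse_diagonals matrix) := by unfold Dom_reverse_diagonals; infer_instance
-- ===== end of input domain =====

-- B builds the 180-degree rotation of the matrix once and takes the rotated value on the
-- diagonals, the original elsewhere (objective: alternative). Return-value equivalence on
-- square matrices.

-- ===== PORT A =====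
-- matrix[i][j] read; exact where both indices are in range (Python raises otherwise; Pre_ excludes that)
def pvGet2 (m : List (List Int)) (i j : Nat) : Int :=
  ((m[i]?.getD []).getD j 0)

-- copy[i][j] = v assignment; exact where both indices are in range (Python raises otherwise; Pre_ excludes that)
def pvSet2 (cp : List (List Int)) (i j : Nat) (v : Int) : List (List Int) :=
  cp.set i ((cp[i]?.getD []).set j v)

def reverse_diagonals (matrix : List (List Int)) : List (List Int) :=
  -- copy = [line[:] for line in matrix]
  let copy := matrix.map (fun line => line)
  let n := matrix.length
  -- for i in range(n): copy[i][i] = matrix[n-1-i][n-1-i]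
  let copy := (List.range n).foldl (fun acc i => pvSet2 acc i i (pvGet2 matrix (n - 1 - i) (n - 1 - i))) copy
  -- for i in range(n): copy[i][n-1-i] = matrix[n-1-i][i]
  let copy := (List.range n).foldl (fun acc i => pvSet2 acc i (n - 1 - i) (pvGet2 matrix (n - 1 - i) i)) copy
  copy

-- ===== PORT B =====
def reverse_diagonals_alt (matrix : List (List Int)) : List (List Int) :=
  let n := matrix.length
  -- rot = [row[::-1] for row in reversed(matrix)]
  let rot := (matrix.reverse).map (fun row => row.reverse)
  (List.range n).map (fun i => (List.range n).map (fun j =>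
    if i = j ∨ i + j = n - 1 then pvGet2 rot i j else pvGet2 matrix i j))

-- ===== PRECONDITION & SPEC =====
-- Pre_ requires a square matrix (every row as long as the number of rows): A also happens to
-- return on some ragged inputs whose rows are long enough, where the extra columns it keeps are
-- an artefact of the copy-and-overwrite implementation that B's n×n construction does not share;
-- on too-short rows A raises IndexError.
def Pre_reverse_diagonals (matrix : List (List Int)) : Prop :=
  ∀ row ∈ matrix, row.length = matrix.length

instance (matrix : List (List Int)) : Decidable (Pre_reverse_diagonals matrix) := by
  unfold Pre_reverse_diagonals; infer_instance

def pvWitness_reverse_diagonals : List (List Int) := [[1, 2], [3, 4]]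

def Spec_reverse_diagonals (matrix : List (List Int)) (out : List (List Int)) : Prop := out = reverse_diagonals_alt matrix
instance (matrix : List (List Int)) (out : List (List Int)) : Decidable (Spec_reverse_diagonals matrix out) := by unfold Spec_reverse_diagonals; infer_instance

-- ===== CLAIM (what is proved, stated in full; the proofs are below) =====
def Claim_equal_reverse_diagonals : Prop := ∀ (matrix : List (List Int)), Dom_reverse_diagonals matrix → Pre_reverse_diagonals matrix → Spec_reverse_diagonals matrix (reverse_diagonals matrix)

-- ===== LEMMAS AND PROOFS =====

-- One pass of writes "row i gets (row i).set (g i) (v i)" over range n, row-wise view.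
theorem foldl_pvSet2_getElem? (g : Nat → Nat) (v : Nat → Int) :
    ∀ (n : Nat) (acc : List (List Int)) (j : Nat),
      ((List.range n).foldl (fun acc i => pvSet2 acc i (g i) (v i)) acc)[j]? =
        if j < n then acc[j]?.map (fun row => row.set (g j) (v j)) else acc[j]? := by
  intro n
  induction n with
  | zero => intro acc j; simp
  | succ n ih =>
    intro acc j
    rw [List.range_succ, List.foldl_append]
    simp only [List.foldl_cons, List.foldl_nil]
    have hlen : ∀ m : Nat, ((List.range m).foldl (fun acc i => pvSet2 acc i (g i) (v i)) acc).length = acc.length := by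
      intro m
      induction m with
      | zero => simp
      | succ k ihk =>
        rw [List.range_succ, List.foldl_append]
        simp only [List.foldl_cons, List.foldl_nil, pvSet2, List.length_set]
        exact ihk
    rw [pvSet2, List.getElem?_set, ih acc n, ih acc j]
    simp only [if_neg (by omega : ¬ n < n)]
    by_cases hj : n = j
    · subst hj
      by_cases hl : n < acc.length
      · simp only [hlen, if_pos hl, if_pos (by omega : n < n + 1)]
        rw [List.getElem?_eq_getElem hl]
        simp
      · simp only [hlen, if_neg hl, if_pos (by omega : n < n + 1)]
        rw [List.getElem?_eq_none (by omega)]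
        simp
    · simp only [if_neg hj]
      by_cases hjn : j < n
      · rw [if_pos hjn, if_pos (by omega : j < n + 1)]
      · rw [if_neg hjn, if_neg (by omega : ¬ j < n + 1)]

-- A's definition with the lets and the row copies reduced away.
theorem reverse_diagonals_eq (matrix : List (List Int)) :
    reverse_diagonals matrix =
      (List.range matrix.length).foldl
        (fun acc i => pvSet2 acc i (matrix.length - 1 - i) (pvGet2 matrix (matrix.length - 1 - i) i))
        ((List.range matrix.length).foldl
          (fun acc i => pvSet2 acc i i (pvGet2 matrix (matrix.length - 1 - i) (matrix.length - 1 - i)))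
          matrix) := by
  simp [reverse_diagonals]

theorem alt_eq (matrix : List (List Int)) :
    reverse_diagonals_alt matrix =
      (List.range matrix.length).map (fun i => (List.range matrix.length).map (fun j =>
        if i = j ∨ i + j = matrix.length - 1
        then pvGet2 ((matrix.reverse).map (fun row => row.reverse)) i j
        else pvGet2 matrix i j)) := rfl

theorem reverse_diagonals_getElem? (matrix : List (List Int)) (j : Nat) :
    (reverse_diagonals matrix)[j]? =
      if j < matrix.length then
        matrix[j]?.map (fun row =>
          (row.set j (pvGet2 matrix (matrix.length - 1 - j) (matrix.length - 1 - j))).set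
            (matrix.length - 1 - j) (pvGet2 matrix (matrix.length - 1 - j) j))
      else matrix[j]? := by
  rw [reverse_diagonals_eq, foldl_pvSet2_getElem?, foldl_pvSet2_getElem?]
  by_cases hj : j < matrix.length
  · simp only [if_pos hj, Option.map_map]
    rfl
  · simp [if_neg hj]

-- The rotated matrix read back: rot[i][j] = matrix[n-1-i][n-1-j] on a square matrix.
theorem pvGet2_rot (matrix : List (List Int)) (hsq : Pre_reverse_diagonals matrix)
    (i j : Nat) (hi : i < matrix.length) (hj : j < matrix.length) :
    pvGet2 ((matrix.reverse).map (fun row => row.reverse)) i j =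
      pvGet2 matrix (matrix.length - 1 - i) (matrix.length - 1 - j) := by
  have hi' : matrix.length - 1 - i < matrix.length := by omega
  have hrow : matrix[matrix.length - 1 - i].length = matrix.length :=
    hsq _ (List.getElem_mem hi')
  have hrev : (matrix.reverse)[i]? = some matrix[matrix.length - 1 - i] := by
    rw [List.getElem?_reverse (by simpa using hi), List.getElem?_eq_getElem]
  have hrev2 : ((matrix.reverse).map (fun row => row.reverse))[i]? =
      some (matrix[matrix.length - 1 - i].reverse) := by
    rw [List.getElem?_map, hrev]; rfl
  have hjr : j < matrix[matrix.length - 1 - i].reverse.length := by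
    rw [List.length_reverse, hrow]; omega
  have hjn' : matrix.length - 1 - j < matrix[matrix.length - 1 - i].length := by omega
  rw [pvGet2, pvGet2, hrev2, List.getElem?_eq_getElem hi']
  simp only [Option.getD_some]
  rw [List.getD_eq_getElem _ _ hjr, List.getD_eq_getElem _ _ hjn', List.getElem_reverse]
  congr 1
  omega

theorem row_eq (matrix : List (List Int)) (hsq : Pre_reverse_diagonals matrix)
    (i : Nat) (hi : i < matrix.length) :
    ((matrix[i].set i (pvGet2 matrix (matrix.length - 1 - i) (matrix.length - 1 - i))).set
        (matrix.length - 1 - i) (pvGet2 matrix (matrix.length - 1 - i) i)) =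
      (List.range matrix.length).map (fun j =>
        if i = j ∨ i + j = matrix.length - 1
        then pvGet2 ((matrix.reverse).map (fun row => row.reverse)) i j
        else pvGet2 matrix i j) := by
  have hrow : matrix[i].length = matrix.length := hsq _ (List.getElem_mem hi)
  apply List.ext_getElem
  · simp [hrow]
  intro j hj1 hj2
  have hjn : j < matrix.length := by simpa using hj2
  have hji : j < matrix[i].length := by omega
  rw [List.getElem_map, List.getElem_range, List.getElem_set, List.getElem_set,
      pvGet2_rot matrix hsq i j hi hjn]
  split_ifs with h1 h2 h3
  all_goals first
    | rfl
    | omega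
    | (congr 1; omega)
    | simp [pvGet2, List.getElem?_eq_getElem hi, List.getD_eq_getElem?_getD,
        List.getElem?_eq_getElem hji]

-- ===== VERDICT (by name: the statement is the Claim_ definition above) =====
theorem reverse_diagonals_spec : Claim_equal_reverse_diagonals := by
  intro matrix _ hsq
  unfold Spec_reverse_diagonals
  rw [alt_eq]
  apply List.ext_getElem?
  intro i
  rw [reverse_diagonals_getElem?]
  by_cases hi : i < matrix.length
  · rw [if_pos hi, List.getElem?_map, List.getElem?_range hi,
        List.getElem?_eq_getElem hi]
    simp only [Option.map_some, Option.some.injEq]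
    exact row_eq matrix hsq i hi
  · rw [if_neg hi, List.getElem?_eq_none (by omega),
        List.getElem?_eq_none (by simpa using hi)]
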